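-- pv_equiv track=rewrite | github.com/hkedjnane/aoc2023 | 18/d18.py | get_point_list
-- ===== SOURCE A (Python) =====
-- vect = [(0, 1), (1, 0), (0, -1), (-1, 0)]
--
-- def add_tuple(t1, t2):
--     return (t1[0] + t2[0], t1[1] + t2[1])
--
-- def mult_tuple(t, n):
--     return t[0] * n, t[1] * n
--
-- def get_point_list(data):
--     origin = (0,0)
--     points = [origin]
--     total = 0
--     for dir, count in data:
--         origin = add_tuple(origin, mult_tuple(vect[dir], count))
--         points.append(origin)
--         total += count
--     return points[:-1], int(total/2 + 1)
-- ===== SOURCE B (Python) =====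
-- vect = [(0, 1), (1, 0), (0, -1), (-1, 0)]
--
-- def get_point_list(data):
--     # Build the vertex list BACK-TO-FRONT: scale the moves, jump straight to the
--     # final endpoint by summing them, then walk backwards subtracting each move.
--     deltas = [(vect[d][0] * c, vect[d][1] * c) for d, c in data]
--     x = sum(dx for dx, _ in deltas)
--     y = sum(dy for _, dy in deltas)
--     rev = []
--     for dx, dy in reversed(deltas):
--         x -= dx
--         y -= dy
--         rev.append((x, y))
--     rev.reverse()
--     total = sum(c for _, c in data)
--     return rev, int(total / 2 + 1)
-- ===== Notes on version B (the rewrite author's own statement) =====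
-- stated objective: alternative
-- what changed: A walks a running origin forward, appending after each step and slicing the endpoint off with [:-1]; B builds the vertex list BACK-TO-FRONT: it scales the moves, jumps straight to the final endpoint by summing them, then walks backwards subtracting each move (so the dropped endpoint is never emitted) and reverses the collected list.
import Mathlib
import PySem

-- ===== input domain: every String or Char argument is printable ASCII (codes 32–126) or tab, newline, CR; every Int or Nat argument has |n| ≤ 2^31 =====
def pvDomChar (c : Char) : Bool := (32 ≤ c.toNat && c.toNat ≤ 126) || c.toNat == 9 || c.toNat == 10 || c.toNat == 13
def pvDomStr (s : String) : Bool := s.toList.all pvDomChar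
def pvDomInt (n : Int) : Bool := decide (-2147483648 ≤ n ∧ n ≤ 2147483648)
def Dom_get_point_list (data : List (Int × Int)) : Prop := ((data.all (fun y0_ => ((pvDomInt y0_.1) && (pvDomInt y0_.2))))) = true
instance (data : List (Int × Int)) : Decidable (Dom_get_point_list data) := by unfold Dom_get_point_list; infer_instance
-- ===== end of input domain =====

-- B builds the vertex list back-to-front: it sums the scaled moves to reach the final endpoint,
-- walks backwards subtracting each move, and reverses — instead of A's forward walk plus [:-1].

-- Shared module-level constant of the Python file.
def vect : List (Int × Int) := [(0, 1), (1, 0), (0, -1), (-1, 0)]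

-- Exact port of Python's `int(t/2 + 1)` for an int t (both Pythons compute it with this very
-- expression): `t/2` is the correctly rounded double of t/2, `+ 1` rounds again, `int` truncates.
-- Values are kept as exact dyadic rationals n/2^k; rounding is IEEE round-half-to-even to 53
-- significant bits (overflow to infinity is unreachable on this domain).
def roundEvenShift (n : Int) (s : Nat) : Int :=
  if s = 0 then n
  else
    let d : Int := 2 ^ s
    let q := Int.fdiv n d
    let r := n - q * d
    if 2 * r < d then q else if 2 * r > d then q + 1 else if q % 2 = 0 then q else q + 1

def roundDbl (n : Int) (k : Nat) : Int × Nat :=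
  let a := n.natAbs
  if a = 0 then (0, 0)
  else
    let b := Nat.log2 a + 1
    if b ≤ 53 then (n, k)
    else
      let s := b - 53
      let m := roundEvenShift n s
      if s ≤ k then (m, k - s) else (m * 2 ^ (s - k), 0)

def pyHalfPlusOne (t : Int) : Int :=
  let v1 := roundDbl t 1
  let v2 := roundDbl (v1.1 + 2 ^ v1.2) v1.2
  Int.tdiv v2.1 (2 ^ v2.2)

-- ===== PORT A =====
def add_tuple (t1 t2 : Int × Int) : Int × Int := (t1.1 + t2.1, t1.2 + t2.2)

def mult_tuple (t : Int × Int) (n : Int) : Int × Int := (t.1 * n, t.2 * n)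

-- state = (origin, points, total); `vect[dir]` = PySem.List.pyGetD (IndexError excluded by Pre_).
def get_point_list (data : List (Int × Int)) : (List (Int × Int)) × Int :=
  let st := data.foldl
    (fun (s : (Int × Int) × List (Int × Int) × Int) dc =>
      let origin := add_tuple s.1 (mult_tuple (PySem.List.pyGetD vect dc.1 (0, 0)) dc.2)
      (origin, s.2.1 ++ [origin], s.2.2 + dc.2))
    ((0, 0), [((0, 0) : Int × Int)], 0)
  (PySem.List.slice st.2.1 none (some (-1)), pyHalfPlusOne st.2.2)

-- ===== PORT B =====
-- scaled moves, endpoint by two coordinate sums, backwards walk subtracting each move, final reverse.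
def get_point_list_alt (data : List (Int × Int)) : (List (Int × Int)) × Int :=
  let deltas := data.map (fun dc =>
    let v := PySem.List.pyGetD vect dc.1 (0, 0)
    (v.1 * dc.2, v.2 * dc.2))
  let x := deltas.foldl (fun s d => s + d.1) 0
  let y := deltas.foldl (fun s d => s + d.2) 0
  let st := deltas.reverse.foldl
    (fun (s : List (Int × Int) × Int × Int) d =>
      (s.1 ++ [(s.2.1 - d.1, s.2.2 - d.2)], s.2.1 - d.1, s.2.2 - d.2))
    ([], x, y)
  let total := data.foldl (fun s dc => s + dc.2) 0
  (st.1.reverse, pyHalfPlusOne total)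

-- ===== PRECONDITION & SPEC =====
-- Pre_ excludes exactly the inputs where `vect[dir]` raises IndexError in A (dir outside [-4, 3]).
def Pre_get_point_list (data : List (Int × Int)) : Prop :=
  ∀ p ∈ data, -4 ≤ p.1 ∧ p.1 < 4
instance (data : List (Int × Int)) : Decidable (Pre_get_point_list data) := by
  unfold Pre_get_point_list; infer_instance

def pvWitness_get_point_list : (List (Int × Int)) := [(0, 6), (1, 5), (2, 6), (3, 5)]

def Spec_get_point_list (data : List (Int × Int)) (out : (List (Int × Int)) × Int) : Prop := out = get_point_list_alt data
instance (data : List (Int × Int)) (out : (List (Int × Int)) × Int) : Decidable (Spec_get_point_list data out) := by unfold Spec_get_point_list; infer_instance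

-- ===== CLAIM (what is proved, stated in full; the proofs are below) =====
def Claim_equal_get_point_list : Prop := ∀ (data : List (Int × Int)), Dom_get_point_list data → Pre_get_point_list data → Spec_get_point_list data (get_point_list data)

-- ===== LEMMAS AND PROOFS =====

-- the scaled step vector of one (dir, count) pair, as both ports compute it
def delta (dc : Int × Int) : Int × Int :=
  let v := PySem.List.pyGetD vect dc.1 (0, 0)
  (v.1 * dc.2, v.2 * dc.2)

-- positions after each step (the points A appends)
def walkA (o : Int × Int) : List (Int × Int) → List (Int × Int)
  | [] => []
  | dc :: l =>
    (o.1 + (delta dc).1, o.2 + (delta dc).2) :: walkA (o.1 + (delta dc).1, o.2 + (delta dc).2) l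

-- positions before each step (the forward prefix-sum walk)
def walkB (o : Int × Int) : List (Int × Int) → List (Int × Int)
  | [] => []
  | d :: ds => o :: walkB (o.1 + d.1, o.2 + d.2) ds

-- final origin of A's loop
def finA (o : Int × Int) : List (Int × Int) → Int × Int
  | [] => o
  | dc :: l => finA (o.1 + (delta dc).1, o.2 + (delta dc).2) l

-- sum of the counts
def sumc : List (Int × Int) → Int
  | [] => 0
  | dc :: l => dc.2 + sumc l

-- componentwise sum of a list of moves
def sumd : List (Int × Int) → Int × Int
  | [] => (0, 0)
  | d :: l => (d.1 + (sumd l).1, d.2 + (sumd l).2)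

-- B's backwards walk: subtract the move, then emit the position
def rwalk (e : Int × Int) : List (Int × Int) → List (Int × Int)
  | [] => []
  | d :: ds => (e.1 - d.1, e.2 - d.2) :: rwalk (e.1 - d.1, e.2 - d.2) ds

-- final position of the backwards walk
def finR (e : Int × Int) : List (Int × Int) → Int × Int
  | [] => e
  | d :: ds => finR (e.1 - d.1, e.2 - d.2) ds

theorem foldA_char (l : List (Int × Int)) (o : Int × Int) (ps : List (Int × Int)) (t : Int) :
    l.foldl
      (fun (s : (Int × Int) × List (Int × Int) × Int) dc =>
        let origin := add_tuple s.1 (mult_tuple (PySem.List.pyGetD vect dc.1 (0, 0)) dc.2)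
        (origin, s.2.1 ++ [origin], s.2.2 + dc.2))
      (o, ps, t)
    = (finA o l, ps ++ walkA o l, t + sumc l) := by
  induction l generalizing o ps t with
  | nil => simp [finA, walkA, sumc]
  | cons dc l ih =>
    simp only [List.foldl_cons]
    rw [ih]
    simp only [finA, walkA, sumc, add_tuple, mult_tuple, delta, List.append_assoc,
      List.singleton_append]
    refine Prod.ext rfl (Prod.ext rfl ?_)
    ring

theorem foldR_char (ds : List (Int × Int)) (ps : List (Int × Int)) (x y : Int) :
    ds.foldl
      (fun (s : List (Int × Int) × Int × Int) d =>
        (s.1 ++ [(s.2.1 - d.1, s.2.2 - d.2)], s.2.1 - d.1, s.2.2 - d.2))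
      (ps, x, y)
    = (ps ++ rwalk (x, y) ds, finR (x, y) ds) := by
  induction ds generalizing ps x y with
  | nil => simp [rwalk, finR]
  | cons d ds ih =>
    simp only [List.foldl_cons]
    rw [ih]
    simp [rwalk, finR, List.append_assoc]

theorem foldSum_char (l : List (Int × Int)) (t : Int) :
    l.foldl (fun s dc => s + dc.2) t = t + sumc l := by
  induction l generalizing t with
  | nil => simp [sumc]
  | cons dc l ih => simp only [List.foldl_cons, sumc]; rw [ih]; ring

theorem foldX_char (l : List (Int × Int)) (t : Int) :
    l.foldl (fun s d => s + d.1) t = t + (sumd l).1 := by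
  induction l generalizing t with
  | nil => simp [sumd]
  | cons d l ih => simp only [List.foldl_cons, sumd]; rw [ih]; ring

theorem rwalk_append (l1 l2 : List (Int × Int)) (e : Int × Int) :
    rwalk e (l1 ++ l2) = rwalk e l1 ++ rwalk (finR e l1) l2 := by
  induction l1 generalizing e with
  | nil => simp [rwalk, finR]
  | cons d l1 ih => simp [rwalk, finR, ih]

theorem finR_sum (l : List (Int × Int)) (e : Int × Int) :
    finR e l = (e.1 - (sumd l).1, e.2 - (sumd l).2) := by
  induction l generalizing e with
  | nil => simp [finR, sumd]
  | cons d l ih =>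
    simp only [finR, sumd, ih]
    refine Prod.ext ?_ ?_ <;> simp <;> ring

theorem sumd_reverse (l : List (Int × Int)) : sumd l.reverse = sumd l := by
  induction l with
  | nil => rfl
  | cons d l ih =>
    have hap : ∀ (l1 l2 : List (Int × Int)),
        sumd (l1 ++ l2) = ((sumd l1).1 + (sumd l2).1, (sumd l1).2 + (sumd l2).2) := by
      intro l1 l2
      induction l1 with
      | nil => simp [sumd]
      | cons a l1 ih1 =>
        simp only [List.cons_append, sumd, ih1]
        refine Prod.ext ?_ ?_ <;> simp <;> ring
    simp only [List.reverse_cons, hap, ih, sumd]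
    refine Prod.ext ?_ ?_ <;> simp <;> ring

theorem rev_rwalk (ds : List (Int × Int)) (o : Int × Int) :
    (rwalk (o.1 + (sumd ds).1, o.2 + (sumd ds).2) ds.reverse).reverse = walkB o ds := by
  induction ds generalizing o with
  | nil => simp [rwalk, walkB, sumd]
  | cons d ds ih =>
    simp only [List.reverse_cons, rwalk_append, finR_sum, sumd_reverse, sumd]
    have h1 : (o.1 + (d.1 + (sumd ds).1) - (sumd ds).1, o.2 + (d.2 + (sumd ds).2) - (sumd ds).2)
        = (o.1 + d.1, o.2 + d.2) := by
      refine Prod.ext ?_ ?_ <;> simp <;> ring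
    have h2 : (o.1 + (d.1 + (sumd ds).1), o.2 + (d.2 + (sumd ds).2))
        = ((o.1 + d.1) + (sumd ds).1, (o.2 + d.2) + (sumd ds).2) := by
      refine Prod.ext ?_ ?_ <;> simp <;> ring
    rw [h1, h2]
    simp only [rwalk, List.reverse_append, List.reverse_cons, List.reverse_nil,
      List.nil_append, List.singleton_append]
    have h3 : (o.1 + d.1 - d.1, o.2 + d.2 - d.2) = o := by
      refine Prod.ext ?_ ?_ <;> simp
    rw [h3]
    exact congrArg (o :: ·) (ih (o.1 + d.1, o.2 + d.2))

theorem sumc_eq_sumd (l : List (Int × Int)) : sumc l = (sumd l).2 := by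
  induction l with
  | nil => rfl
  | cons d l ih => simp [sumc, sumd, ih]

theorem walk_dropLast (l : List (Int × Int)) (o : Int × Int) :
    (o :: walkA o l).dropLast = walkB o (l.map delta) := by
  induction l generalizing o with
  | nil => simp [walkA, walkB]
  | cons dc l ih =>
    simp only [walkA, walkB, List.map_cons, List.dropLast_cons₂]
    exact congrArg _ (ih _)

-- ===== VERDICT (by name: the statement is the Claim_ definition above) =====
theorem get_point_list_spec : Claim_equal_get_point_list := by
  intro data _ _
  unfold Spec_get_point_list get_point_list get_point_list_alt
  have hd : data.map (fun dc => let v := PySem.List.pyGetD vect dc.1 (0, 0);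
      ((v.1 * dc.2, v.2 * dc.2) : Int × Int)) = data.map delta := rfl
  simp only [foldA_char, foldR_char, foldSum_char, foldX_char, hd,
    PySem.List.slice_to_neg_one, zero_add, List.nil_append, sumc_eq_sumd]
  refine Prod.ext ?_ rfl
  show ([(0, 0)] ++ walkA (0, 0) data).dropLast
      = (rwalk ((sumd (data.map delta)).1, (sumd (data.map delta)).2)
          (data.map delta).reverse).reverse
  rw [List.singleton_append, walk_dropLast data (0, 0)]
  have h := rev_rwalk (data.map delta) ((0 : Int), (0 : Int))
  simp only [zero_add] at h
  exact h.symm
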